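-- pv_equiv track=rewrite | github.com/argeanima/electron-counting2 | source/Optimizado_metales_completo.py | corrige_matrizBO
-- ===== SOURCE A (Python) =====
-- def corrige_matrizBO(vec_ver,vec_bo,ma_ad):
--
--     BO = ma_ad
--
--     for k in range(len(vec_bo)):
--         for i in range(len(vec_ver[k])):
--             for j in range(i,len(vec_ver[k])):
--                 BO[vec_ver[k][i]][vec_ver[k][j]] = vec_bo[k][i][j]
--                 BO[vec_ver[k][j]][vec_ver[k][i]] = vec_bo[k][j][i]
--
--     return BO
-- ===== SOURCE B (Python) =====
-- def corrige_matrizBO(vec_ver, vec_bo, ma_ad):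
--     # Same matrix, plainer traversal: walk each block's vertex list twice in
--     # full (zip/enumerate), one assignment per ordered pair -- no triangular
--     # index arithmetic and no mirrored second write.  Mutates ma_ad like the
--     # original (BO is an alias of ma_ad).
--     BO = ma_ad
--     for verts, bo in zip(vec_ver, vec_bo):
--         for i, p in enumerate(verts):
--             for j, q in enumerate(verts):
--                 BO[p][q] = bo[i][j]
--     return BO
-- ===== Notes on version B (the rewrite author's own statement) =====
-- stated objective: simpler
-- what changed: Replaces the triangular loop (j from i) with its paired mirror write by a full square zip/enumerate traversal doing a single assignment per ordered pair; equality (including duplicate vertex indices, where last-write-wins order differs) is proved exactly.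
import Mathlib
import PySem

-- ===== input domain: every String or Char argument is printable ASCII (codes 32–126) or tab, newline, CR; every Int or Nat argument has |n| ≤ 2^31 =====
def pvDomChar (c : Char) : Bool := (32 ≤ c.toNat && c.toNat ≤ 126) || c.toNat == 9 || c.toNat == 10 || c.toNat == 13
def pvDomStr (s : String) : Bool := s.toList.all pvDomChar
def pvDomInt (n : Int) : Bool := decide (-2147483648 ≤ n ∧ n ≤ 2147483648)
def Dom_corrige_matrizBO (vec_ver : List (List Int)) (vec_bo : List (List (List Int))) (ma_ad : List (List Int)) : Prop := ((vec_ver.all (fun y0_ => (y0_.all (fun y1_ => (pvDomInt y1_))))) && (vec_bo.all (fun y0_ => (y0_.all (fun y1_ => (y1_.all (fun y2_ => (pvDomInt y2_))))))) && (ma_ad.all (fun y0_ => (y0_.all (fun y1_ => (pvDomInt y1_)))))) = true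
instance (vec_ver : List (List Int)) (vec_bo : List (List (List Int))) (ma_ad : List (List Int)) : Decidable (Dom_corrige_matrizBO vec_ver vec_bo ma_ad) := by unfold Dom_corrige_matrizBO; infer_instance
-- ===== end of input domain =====

-- B replaces A's triangular loop + mirrored double write by a full square zip/enumerate
-- traversal with one assignment per ordered pair (simpler); equality of the RETURN value is
-- proved (both Pythons also mutate ma_ad in place, identically).

-- ===== PORT A =====
-- shared 2D-assignment helper: Python's `BO[p][q] = v`, total form (under Pre_ every index is in range)
def set2 (BO : List (List Int)) (p q v : Int) : List (List Int) :=
  PySem.List.pySetD BO p (PySem.List.pySetD (PySem.List.pyGetD BO p []) q v)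

def corrige_matrizBO (vec_ver : List (List Int)) (vec_bo : List (List (List Int))) (ma_ad : List (List Int)) : List (List Int) :=
  (List.range vec_bo.length).foldl (fun BO (k : Nat) =>
    (List.range (PySem.List.pyGetD vec_ver (k : Int) []).length).foldl (fun BO (i : Nat) =>
      (List.range' i ((PySem.List.pyGetD vec_ver (k : Int) []).length - i)).foldl (fun BO (j : Nat) =>
        set2 (set2 BO (PySem.List.pyGetD (PySem.List.pyGetD vec_ver (k : Int) []) (i : Int) 0)
                (PySem.List.pyGetD (PySem.List.pyGetD vec_ver (k : Int) []) (j : Int) 0)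
                (PySem.List.pyGetD (PySem.List.pyGetD (PySem.List.pyGetD vec_bo (k : Int) []) (i : Int) []) (j : Int) 0))
          (PySem.List.pyGetD (PySem.List.pyGetD vec_ver (k : Int) []) (j : Int) 0)
          (PySem.List.pyGetD (PySem.List.pyGetD vec_ver (k : Int) []) (i : Int) 0)
          (PySem.List.pyGetD (PySem.List.pyGetD (PySem.List.pyGetD vec_bo (k : Int) []) (j : Int) []) (i : Int) 0)) BO) BO) ma_ad

-- ===== PORT B =====
def corrige_matrizBO_alt (vec_ver : List (List Int)) (vec_bo : List (List (List Int))) (ma_ad : List (List Int)) : List (List Int) :=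
  (vec_ver.zip vec_bo).foldl (fun BO vkbk =>
    (PySem.List.enumerate vkbk.1).foldl (fun BO ip =>
      (PySem.List.enumerate vkbk.1).foldl (fun BO jq =>
        set2 BO ip.2 jq.2 (PySem.List.pyGetD (PySem.List.pyGetD vkbk.2 ip.1 []) jq.1 0)) BO) BO) ma_ad

-- ===== PRECONDITION & SPEC =====
-- Exactly the inputs on which Python A returns (no IndexError): every block index k has a
-- vertex list, the bond-order block is large enough for it, and every vertex index is a
-- valid (possibly negative) Python index into the matrix and into the touched rows.
def Pre_corrige_matrizBO (vec_ver : List (List Int)) (vec_bo : List (List (List Int))) (ma_ad : List (List Int)) : Prop :=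
  ∀ k, k < vec_bo.length →
    k < vec_ver.length ∧
    (∀ i, i < (vec_ver.getD k []).length →
      i < (vec_bo.getD k []).length ∧
      (vec_ver.getD k []).length ≤ ((vec_bo.getD k []).getD i []).length ∧
      PySem.Raise.InRange ma_ad.length ((vec_ver.getD k []).getD i 0) ∧
      (∀ j, j < (vec_ver.getD k []).length →
        PySem.Raise.InRange (PySem.List.pyGetD ma_ad ((vec_ver.getD k []).getD i 0) []).length
          ((vec_ver.getD k []).getD j 0)))

instance (vec_ver : List (List Int)) (vec_bo : List (List (List Int))) (ma_ad : List (List Int)) : Decidable (Pre_corrige_matrizBO vec_ver vec_bo ma_ad) := by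
  unfold Pre_corrige_matrizBO PySem.Raise.InRange; infer_instance

def pvWitness_corrige_matrizBO : List (List Int) × List (List (List Int)) × List (List Int) :=
  ([[0, 1]], [[[1, 2], [3, 4]]], [[0, 0], [0, 0]])

def Spec_corrige_matrizBO (vec_ver : List (List Int)) (vec_bo : List (List (List Int))) (ma_ad : List (List Int)) (out : List (List Int)) : Prop := out = corrige_matrizBO_alt vec_ver vec_bo ma_ad
instance (vec_ver : List (List Int)) (vec_bo : List (List (List Int))) (ma_ad : List (List Int)) (out : List (List Int)) : Decidable (Spec_corrige_matrizBO vec_ver vec_bo ma_ad out) := by unfold Spec_corrige_matrizBO; infer_instance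

-- ===== CLAIM (what is proved, stated in full; the proofs are below) =====
def Claim_equal_corrige_matrizBO : Prop := ∀ (vec_ver : List (List Int)) (vec_bo : List (List (List Int))) (ma_ad : List (List Int)), Dom_corrige_matrizBO vec_ver vec_bo ma_ad → Pre_corrige_matrizBO vec_ver vec_bo ma_ad → Spec_corrige_matrizBO vec_ver vec_bo ma_ad (corrige_matrizBO vec_ver vec_bo ma_ad)

-- ===== LEMMAS AND PROOFS =====

-- Abstraction: both programs are a sequence of single-cell writes applied to ma_ad.
def applyWrites (ws : List (Int × Int × Int)) (BO : List (List Int)) : List (List Int) :=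
  ws.foldl (fun BO w => set2 BO w.1 w.2.1 w.2.2) BO

def getCell (M : List (List Int)) (r c : Nat) : Int := (M.getD r []).getD c 0

-- effect of one write on the fixed cell (r, c) of a matrix with m rows whose row r has rl entries
def cellStep (m rl r c : Nat) (cur : Int) (w : Int × Int × Int) : Int :=
  if PySem.List.pyIdx? m w.1 = some r ∧ PySem.List.pyIdx? rl w.2.1 = some c then w.2.2 else cur

-- the write lists of the two programs
def blockAw (v : List Int) (b : List (List Int)) : List (Int × Int × Int) :=
  (List.range v.length).flatMap (fun i =>
    (List.range' i (v.length - i)).flatMap (fun j =>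
      [(v.getD i 0, v.getD j 0, (b.getD i []).getD j 0),
       (v.getD j 0, v.getD i 0, (b.getD j []).getD i 0)]))

def blockBw (v : List Int) (b : List (List Int)) : List (Int × Int × Int) :=
  (List.range v.length).flatMap (fun i =>
    (List.range v.length).flatMap (fun j =>
      [(v.getD i 0, v.getD j 0, (b.getD i []).getD j 0)]))

def wsA (vec_ver : List (List Int)) (vec_bo : List (List (List Int))) : List (Int × Int × Int) :=
  (List.range vec_bo.length).flatMap (fun k => blockAw (vec_ver.getD k []) (vec_bo.getD k []))

def wsB (vec_ver : List (List Int)) (vec_bo : List (List (List Int))) : List (Int × Int × Int) :=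
  (vec_ver.zip vec_bo).flatMap (fun p => blockBw p.1 p.2)

-- generic fold shapes
theorem foldl_flatMap {α β γ : Type} (l : List α) (g : α → List β) (f : γ → β → γ) (x : γ) :
    (l.flatMap g).foldl f x = l.foldl (fun x a => (g a).foldl f x) x := by
  induction l generalizing x with
  | nil => rfl
  | cons a t ih => simp [List.flatMap_cons, List.foldl_append, ih]

def lastHit (P : Nat → Prop) [DecidablePred P] (l : List Nat) : Option Nat :=
  (l.filter (fun j => decide (P j))).getLast?

theorem lastHit_cons (P : Nat → Prop) [DecidablePred P] (a : Nat) (l : List Nat) :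
    lastHit P (a :: l) = (lastHit P l).or (if P a then some a else none) := by
  unfold lastHit
  by_cases h : P a <;> simp [h]
  · rw [show (a :: List.filter (fun j => decide (P j)) l) = [a] ++ List.filter (fun j => decide (P j)) l from rfl,
      List.getLast?_append]
    simp

theorem lastHit_none_not {P : Nat → Prop} [DecidablePred P] {l : List Nat}
    (h : lastHit P l = none) : ∀ j ∈ l, ¬ P j := by
  unfold lastHit at h
  rw [List.getLast?_eq_none_iff, List.filter_eq_nil_iff] at h
  intro j hj hPj
  exact (h j hj) (by simpa using hPj)

theorem lastPick (P : Nat → Prop) [DecidablePred P] (f : Nat → Int) :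
    ∀ (l : List Nat) (x : Int),
      l.foldl (fun e j => if P j then f j else e) x = ((lastHit P l).map f).getD x := by
  intro l
  induction l with
  | nil => intro x; rfl
  | cons a t ih =>
    intro x
    rw [List.foldl_cons, ih, lastHit_cons]
    cases h : lastHit P t <;> by_cases hp : P a <;> simp [hp]

-- closed form of one block of B
theorem blockB_closed (P Q : Nat → Prop) [DecidablePred P] [DecidablePred Q]
    (bf : Nat → Nat → Int) (n : Nat) (x : Int) :
    (List.range n).foldl (fun x i =>
      (List.range n).foldl (fun e j => if P i ∧ Q j then bf i j else e) x) x =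
    (match lastHit P (List.range n), lastHit Q (List.range n) with
     | some a, some c => bf a c
     | _, _ => x) := by
  have inner : ∀ (i : Nat) (x : Int),
      (List.range n).foldl (fun e j => if P i ∧ Q j then bf i j else e) x =
      if P i then ((lastHit Q (List.range n)).map (bf i)).getD x else x := by
    intro i x
    by_cases hp : P i
    · rw [PySem.List.foldl_congr_mem _ _ (fun e j => if Q j then bf i j else e) _
        (by intro acc j _; simp [hp])]
      simp [lastPick Q (bf i), hp]
    · rw [PySem.List.foldl_congr_mem _ _ (fun e j => e) _ (by intro acc j _; simp [hp])]
      simp [hp]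
  rw [PySem.List.foldl_congr_mem _ _
      (fun x i => if P i then ((lastHit Q (List.range n)).map (bf i)).getD x else x) _
      (by intro acc i _; exact inner i acc)]
  cases hq : lastHit Q (List.range n) with
  | none =>
    rw [PySem.List.foldl_congr_mem _ _ (fun x i => x) _ (by intro acc i _; simp)]
    rw [PySem.List.foldl_ignore]
    cases hp : lastHit P (List.range n) <;> rfl
  | some c =>
    rw [PySem.List.foldl_congr_mem _ _ (fun x i => if P i then bf i c else x) _
      (by intro acc i _; simp)]
    rw [lastPick P (fun i => bf i c)]
    cases hp : lastHit P (List.range n) <;> simp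

-- closed form of one block of A, by downward induction over the outer loop
theorem blockA_suffix (P Q : Nat → Prop) [DecidablePred P] [DecidablePred Q]
    (bf : Nat → Nat → Int) :
    ∀ (t s : Nat) (x : Int),
      (List.range' s t).foldl (fun x i =>
        (List.range' i (s + t - i)).foldl (fun e j =>
          if P j ∧ Q i then bf j i else if P i ∧ Q j then bf i j else e) x) x =
      (match lastHit P (List.range' s t), lastHit Q (List.range' s t) with
       | some a, some c => bf a c
       | _, _ => x) := by
  intro t
  induction t with
  | zero => intro s x; rfl
  | succ t ih =>
    intro s x
    rw [List.range'_succ, List.foldl_cons]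
    have harg : s + (t + 1) - s = t + 1 := by omega
    have hcount : ∀ i, s + (t + 1) - i = (s + 1) + t - i := by omega
    rw [PySem.List.foldl_congr_mem _ _
        (fun x i => (List.range' i ((s + 1) + t - i)).foldl (fun e j =>
          if P j ∧ Q i then bf j i else if P i ∧ Q j then bf i j else e) x) _
        (by intro acc i _; rw [hcount i])]
    rw [ih (s + 1)]
    -- the value the first row (i = s) leaves behind
    have hrowlist : List.range' s (s + (t + 1) - s) = s :: List.range' (s + 1) t := by
      rw [harg, List.range'_succ]
    have hmem : ∀ j ∈ List.range' s (s + (t + 1) - s), j = s ∨ j ∈ List.range' (s + 1) t := by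
      intro j hj; rw [hrowlist] at hj; simpa using hj
    cases hp : lastHit P (List.range' (s + 1) t) with
    | some a =>
      cases hq : lastHit Q (List.range' (s + 1) t) with
      | some c =>
        rw [lastHit_cons, lastHit_cons, hp, hq]; rfl
      | none =>
        -- no later j satisfies Q: row s behaves like "for j ≥ s: if P j ∧ Q s: write bf j s"
        have hnq := lastHit_none_not hq
        rw [PySem.List.foldl_congr_mem _ _ (fun e j => if P j ∧ Q s then bf j s else e) _ ?hcg]
        case hcg =>
          intro acc j hj
          rcases hmem j hj with rfl | hj'
          · by_cases h1 : P j ∧ Q j <;> simp [h1]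
          · have : ¬ Q j := hnq j hj'
            simp [this]
        rw [lastHit_cons, lastHit_cons, hp, hq]
        by_cases hqs : Q s
        · rw [PySem.List.foldl_congr_mem _ _ (fun e j => if P j then bf j s else e) _
            (by intro acc j _; simp [hqs])]
          rw [lastPick P (fun j => bf j s)]
          rw [show lastHit P (List.range' s (s + (t + 1) - s)) = lastHit P (s :: List.range' (s + 1) t) from by rw [hrowlist]]
          rw [lastHit_cons, hp]
          simp [hqs]
        · rw [PySem.List.foldl_congr_mem _ _ (fun e _ => e) _
            (by intro acc j _; simp [hqs])]
          rw [PySem.List.foldl_ignore]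
          simp [hqs]
    | none =>
      -- no later i satisfies P: row s behaves like "for j ≥ s: if P s ∧ Q j: write bf s j"
      have hnp := lastHit_none_not hp
      rw [PySem.List.foldl_congr_mem _ _ (fun e j => if P s ∧ Q j then bf s j else e) _ ?hcg2]
      case hcg2 =>
        intro acc j hj
        rcases hmem j hj with rfl | hj'
        · by_cases h1 : P j ∧ Q j <;> simp [h1]
        · have : ¬ P j := hnp j hj'
          simp [this]
      rw [lastHit_cons, lastHit_cons, hp]
      by_cases hps : P s
      · rw [PySem.List.foldl_congr_mem _ _ (fun e j => if Q j then bf s j else e) _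
          (by intro acc j _; simp [hps])]
        rw [lastPick Q (bf s)]
        rw [show lastHit Q (List.range' s (s + (t + 1) - s)) = lastHit Q (s :: List.range' (s + 1) t) from by rw [hrowlist]]
        rw [lastHit_cons]
        cases hq : lastHit Q (List.range' (s + 1) t)
        · simp [hps]
          by_cases hqs : Q s <;> simp [hqs]
        · simp [hps]
      · rw [PySem.List.foldl_congr_mem _ _ (fun e _ => e) _
          (by intro acc j _; simp [hps])]
        rw [PySem.List.foldl_ignore]
        cases hq' : lastHit Q (s :: List.range' (s + 1) t) <;> simp [hps]

theorem blockA_closed (P Q : Nat → Prop) [DecidablePred P] [DecidablePred Q]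
    (bf : Nat → Nat → Int) (n : Nat) (x : Int) :
    (List.range n).foldl (fun x i =>
      (List.range' i (n - i)).foldl (fun e j =>
        if P j ∧ Q i then bf j i else if P i ∧ Q j then bf i j else e) x) x =
    (match lastHit P (List.range n), lastHit Q (List.range n) with
     | some a, some c => bf a c
     | _, _ => x) := by
  have := blockA_suffix P Q bf n 0 x
  simpa [List.range_eq_range'] using this

-- the two write lists hit any fixed cell with the same final value
theorem block_fold_eq (v : List Int) (b : List (List Int)) (m rl r c : Nat) (x : Int) :
    (blockAw v b).foldl (cellStep m rl r c) x = (blockBw v b).foldl (cellStep m rl r c) x := by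
  unfold blockAw blockBw
  rw [foldl_flatMap, foldl_flatMap]
  have hA := blockA_closed (fun i => PySem.List.pyIdx? m (v.getD i 0) = some r)
      (fun j => PySem.List.pyIdx? rl (v.getD j 0) = some c)
      (fun i j => (b.getD i []).getD j 0) v.length x
  have hB := blockB_closed (fun i => PySem.List.pyIdx? m (v.getD i 0) = some r)
      (fun j => PySem.List.pyIdx? rl (v.getD j 0) = some c)
      (fun i j => (b.getD i []).getD j 0) v.length x
  calc (List.range v.length).foldl (fun x i => ((List.range' i (v.length - i)).flatMap (fun j =>
          [(v.getD i 0, v.getD j 0, (b.getD i []).getD j 0),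
           (v.getD j 0, v.getD i 0, (b.getD j []).getD i 0)])).foldl (cellStep m rl r c) x) x
      = (List.range v.length).foldl (fun x i =>
          (List.range' i (v.length - i)).foldl (fun e j =>
            if PySem.List.pyIdx? m (v.getD j 0) = some r ∧ PySem.List.pyIdx? rl (v.getD i 0) = some c
            then (b.getD j []).getD i 0
            else if PySem.List.pyIdx? m (v.getD i 0) = some r ∧ PySem.List.pyIdx? rl (v.getD j 0) = some c
            then (b.getD i []).getD j 0 else e) x) x := by
        apply PySem.List.foldl_congr_mem
        intro acc i _
        rw [foldl_flatMap]
        apply PySem.List.foldl_congr_mem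
        intro acc2 j _
        simp [List.foldl_cons, List.foldl_nil, cellStep]
    _ = (List.range v.length).foldl (fun x i =>
          (List.range v.length).foldl (fun e j =>
            if PySem.List.pyIdx? m (v.getD i 0) = some r ∧ PySem.List.pyIdx? rl (v.getD j 0) = some c
            then (b.getD i []).getD j 0 else e) x) x := by rw [hA, hB]
    _ = _ := by
        apply PySem.List.foldl_congr_mem
        intro acc i _
        rw [foldl_flatMap]
        apply PySem.List.foldl_congr_mem
        intro acc2 j _
        simp [List.foldl_cons, List.foldl_nil, cellStep]

-- aligning A's outer loop over range(len(vec_bo)) with B's loop over zip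
theorem foldl_range_getD {α β γ : Type} (g : α → β → γ → γ) (da : α) (db : β)
    (hg : ∀ b x, g da b x = x) :
    ∀ (vv : List α) (vb : List β) (x : γ),
      (List.range vb.length).foldl (fun x k => g (vv.getD k da) (vb.getD k db) x) x =
      (vv.zip vb).foldl (fun x p => g p.1 p.2 x) x := by
  intro vv vb
  induction vb generalizing vv with
  | nil => intro x; simp
  | cons y vb' ih =>
    intro x
    rw [List.length_cons, List.range_succ_eq_map, List.foldl_cons, List.foldl_map]
    cases vv with
    | nil =>
      rw [PySem.List.foldl_congr_mem _ _ (fun x k => x) _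
        (by intro acc k _; simp [hg])]
      simp [hg]
    | cons a vv' =>
      simpa using ih vv' (g a y x)

-- per-cell agreement of the complete write sequences
theorem percell (vv : List (List Int)) (vb : List (List (List Int))) (m rl r c : Nat) (x : Int) :
    (wsA vv vb).foldl (cellStep m rl r c) x = (wsB vv vb).foldl (cellStep m rl r c) x := by
  unfold wsA wsB
  rw [foldl_flatMap, foldl_flatMap]
  rw [foldl_range_getD (fun v b x => (blockAw v b).foldl (cellStep m rl r c) x) [] []
    (by intro b x; rfl)]
  apply PySem.List.foldl_congr_mem
  intro acc p _
  exact block_fold_eq p.1 p.2 m rl r c acc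

-- set2 / applyWrites shape lemmas
theorem pyIdx?_lt {n : Nat} {i : Int} {k : Nat} (h : PySem.List.pyIdx? n i = some k) : k < n := by
  unfold PySem.List.pyIdx? at h
  split_ifs at h with h1 h2 h3 <;> simp_all <;> omega

theorem len_set2 (BO : List (List Int)) (p q v : Int) : (set2 BO p q v).length = BO.length := by
  simp [set2, PySem.List.length_pySetD]

theorem set2_eq (BO : List (List Int)) (p q v : Int) :
    set2 BO p q v = match PySem.List.pyIdx? BO.length p with
      | none => BO
      | some k => BO.set k (PySem.List.pySetD (BO.getD k []) q v) := by
  unfold set2 PySem.List.pySetD PySem.List.pySet? PySem.List.pyGetD PySem.List.pyGet?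
  cases h : PySem.List.pyIdx? BO.length p with
  | none => simp
  | some k =>
    have hk := pyIdx?_lt h
    simp [List.getElem?_eq_getElem hk]

theorem rowlen_set2 (BO : List (List Int)) (p q v : Int) (r : Nat) :
    ((set2 BO p q v).getD r []).length = (BO.getD r []).length := by
  rw [set2_eq]
  cases h : PySem.List.pyIdx? BO.length p with
  | none => rfl
  | some k =>
    have hk := pyIdx?_lt h
    simp only [List.getD_eq_getElem?_getD, List.getElem?_set]
    by_cases hkr : k = r
    · subst hkr
      simp [hk, PySem.List.length_pySetD]
    · simp [hkr]

theorem getCell_set2 (BO : List (List Int)) (p q v : Int) (r c : Nat)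
    (hr : r < BO.length) :
    getCell (set2 BO p q v) r c =
      cellStep BO.length ((BO.getD r []).length) r c (getCell BO r c) (p, q, v) := by
  unfold getCell cellStep
  rw [set2_eq]
  cases h : PySem.List.pyIdx? BO.length p with
  | none => simp
  | some k =>
    have hk := pyIdx?_lt h
    simp only [List.getD_eq_getElem?_getD, List.getElem?_set]
    by_cases hkr : k = r
    · subst hkr
      simp only [if_pos hk]
      unfold PySem.List.pySetD PySem.List.pySet?
      cases h2 : PySem.List.pyIdx? (BO[k]?.getD []).length q with
      | none =>
        simp only [Option.map_none, Option.getD_none]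
        simp
      | some c' =>
        have hc' := pyIdx?_lt h2
        simp only [Option.map_some, Option.getD_some]
        by_cases hcc : c' = c
        · subst hcc
          simp [List.getElem?_set_self hc']
        · simp [List.getElem?_set_ne hcc, hcc]
    · simp [hkr]

theorem len_applyWrites (ws : List (Int × Int × Int)) (BO : List (List Int)) :
    (applyWrites ws BO).length = BO.length := by
  induction ws generalizing BO with
  | nil => rfl
  | cons w t ih => rw [applyWrites, List.foldl_cons]; rw [← applyWrites] at *; rw [ih, len_set2]

theorem rowlen_applyWrites (ws : List (Int × Int × Int)) (BO : List (List Int)) (r : Nat) :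
    ((applyWrites ws BO).getD r []).length = (BO.getD r []).length := by
  induction ws generalizing BO with
  | nil => rfl
  | cons w t ih => rw [applyWrites, List.foldl_cons]; rw [← applyWrites] at *; rw [ih, rowlen_set2]

theorem cellChar (ws : List (Int × Int × Int)) (BO : List (List Int)) (r c : Nat)
    (hr : r < BO.length) :
    getCell (applyWrites ws BO) r c =
      ws.foldl (cellStep BO.length ((BO.getD r []).length) r c) (getCell BO r c) := by
  induction ws generalizing BO with
  | nil => rfl
  | cons w t ih =>
    rw [applyWrites, List.foldl_cons, ← applyWrites, List.foldl_cons]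
    have h1 := ih (set2 BO w.1 w.2.1 w.2.2) (by rwa [len_set2])
    rw [h1, len_set2, rowlen_set2, getCell_set2 _ _ _ _ _ _ hr]

-- the ports are their write sequences
theorem portA_eq (vv : List (List Int)) (vb : List (List (List Int))) (ma : List (List Int)) :
    corrige_matrizBO vv vb ma = applyWrites (wsA vv vb) ma := by
  unfold corrige_matrizBO applyWrites wsA blockAw
  rw [foldl_flatMap]
  apply PySem.List.foldl_congr_mem
  intro acc k _
  rw [foldl_flatMap]
  simp only [PySem.List.pyGetD_natCast]
  apply PySem.List.foldl_congr_mem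
  intro acc2 i _
  rw [foldl_flatMap]
  apply PySem.List.foldl_congr_mem
  intro acc3 j _
  simp [List.foldl_cons, List.foldl_nil]

theorem portB_eq (vv : List (List Int)) (vb : List (List (List Int))) (ma : List (List Int)) :
    corrige_matrizBO_alt vv vb ma = applyWrites (wsB vv vb) ma := by
  unfold corrige_matrizBO_alt applyWrites wsB blockBw
  rw [foldl_flatMap]
  apply PySem.List.foldl_congr_mem
  intro acc p _
  rw [foldl_flatMap]
  rw [PySem.List.enumerate_eq_map_pyRange p.1 0]
  simp only [PySem.List.len, PySem.List.pyRange_zero_natCast, List.map_map, List.foldl_map,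
    Function.comp, PySem.List.pyGetD_natCast]
  apply PySem.List.foldl_congr_mem
  intro acc2 i _
  rw [foldl_flatMap]
  apply PySem.List.foldl_congr_mem
  intro acc3 j _
  simp [List.foldl_cons, List.foldl_nil]

theorem main_eq (vv : List (List Int)) (vb : List (List (List Int))) (ma : List (List Int)) :
    corrige_matrizBO vv vb ma = corrige_matrizBO_alt vv vb ma := by
  rw [portA_eq, portB_eq]
  apply List.ext_getElem
  · rw [len_applyWrites, len_applyWrites]
  intro r h1 h2
  have hr : r < ma.length := by rwa [len_applyWrites] at h1
  apply List.ext_getElem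
  · have e1 := rowlen_applyWrites (wsA vv vb) ma r
    have e2 := rowlen_applyWrites (wsB vv vb) ma r
    rw [List.getD_eq_getElem _ _ h1] at e1
    rw [List.getD_eq_getElem _ _ h2] at e2
    rw [e1, e2]
  intro c hc1 hc2
  have hcell1 : (applyWrites (wsA vv vb) ma)[r][c] = getCell (applyWrites (wsA vv vb) ma) r c := by
    unfold getCell
    rw [List.getD_eq_getElem _ _ h1, List.getD_eq_getElem _ _ hc1]
  have hcell2 : (applyWrites (wsB vv vb) ma)[r][c] = getCell (applyWrites (wsB vv vb) ma) r c := by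
    unfold getCell
    rw [List.getD_eq_getElem _ _ h2, List.getD_eq_getElem _ _ hc2]
  rw [hcell1, hcell2, cellChar _ _ _ _ hr, cellChar _ _ _ _ hr]
  exact percell vv vb ma.length ((ma.getD r []).length) r c (getCell ma r c)

-- ===== VERDICT (by name: the statement is the Claim_ definition above) =====
theorem corrige_matrizBO_spec : Claim_equal_corrige_matrizBO := by
  intro vv vb ma _ _
  unfold Spec_corrige_matrizBO
  exact main_eq vv vb ma
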